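-- pv_equiv track=rewrite | github.com/miliar/Code_Jam_Webscraper | Solutions_python/Problem_201/421.py | solve
-- ===== SOURCE A (Python) =====
-- from collections import defaultdict
--
-- def solve(n, k):
--     d = defaultdict(lambda: 0)
--     d[n] = 1
--     while True:
--         old_items = list(reversed(sorted(d.items())))
--         d = defaultdict(lambda: 0)
--         for key, val in old_items:
--             if k <= val:
--                 return key // 2, key // 2 - (key % 2 == 0)
--             k -= val
--
--             if key % 2 == 0:
--                 d[key // 2] += val
--                 d[key // 2 - 1] += val
--             else:
--                 d[key // 2] += 2 * val
-- ===== SOURCE B (Python) =====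
-- def solve(n, k):
--     # Closed form: after level t (2^t - 1 people seated), segment sizes are
--     # n//2^t and n//2^t - 1, with n%2^t + 1 copies of the larger, served first.
--     if k < 1:
--         key = n
--     else:
--         t = k.bit_length() - 1
--         p = 1 << t
--         key = n // p if k - (p - 1) <= n % p + 1 else n // p - 1
--     return key // 2, key // 2 - (key % 2 == 0)
-- ===== Notes on version B (the rewrite author's own statement) =====
-- stated objective: faster
-- what changed: B replaces A's per-level simulation (rebuilding and sorting a dict of segment-size counts every round) with a closed form: after 2^t - 1 people the segments have sizes n//2^t and n//2^t - 1 with n%2^t + 1 copies of the larger served first, so the k-th person's segment is read directly from k.bit_length().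
import Mathlib
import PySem

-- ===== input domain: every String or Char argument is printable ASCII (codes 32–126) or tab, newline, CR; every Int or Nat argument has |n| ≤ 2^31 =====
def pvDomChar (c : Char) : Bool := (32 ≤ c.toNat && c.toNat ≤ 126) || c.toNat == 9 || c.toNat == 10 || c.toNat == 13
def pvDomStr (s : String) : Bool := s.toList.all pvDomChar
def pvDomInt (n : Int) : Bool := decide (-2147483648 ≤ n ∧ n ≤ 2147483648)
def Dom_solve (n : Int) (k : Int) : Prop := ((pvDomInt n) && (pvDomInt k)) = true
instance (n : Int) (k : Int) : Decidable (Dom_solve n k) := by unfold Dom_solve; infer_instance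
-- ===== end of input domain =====

-- B replaces A's per-level dict rebuild (sort + re-count every round) by a closed form read
-- off from k.bit_length(): after 2^t - 1 people the segment sizes are n//2^t and n//2^t - 1.

-- ===== PORT A =====
-- the 'for key, val in old_items' loop: .inl = the function returned, .inr = (new dict, new k)
def solveInner : List (Int × Int) → Int → PySem.Dict Int Int →
    Sum (Int × Int) (PySem.Dict Int Int × Int)
  | [], k, d => .inr (d, k)
  | (key, val) :: rest, k, d =>
    if k ≤ val then
      .inl (PySem.Int.floordiv key 2,
            PySem.Int.floordiv key 2 - (if PySem.Int.mod key 2 = 0 then 1 else 0))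
    else
      if PySem.Int.mod key 2 = 0 then
        solveInner rest (k - val)
          ((d.modify (PySem.Int.floordiv key 2) 0 (· + val)).modify
            (PySem.Int.floordiv key 2 - 1) 0 (· + val))
      else
        solveInner rest (k - val) (d.modify (PySem.Int.floordiv key 2) 0 (· + 2 * val))

-- the 'while True' loop; the fuel only makes it total and is proven sufficient below
def solveLoop : Nat → PySem.Dict Int Int → Int → Int × Int
  | 0, _, _ => (0, 0)
  | fuel + 1, d, k =>
    match solveInner ((PySem.List.sorted2 d.items (fun p => p.1) (fun p => p.2)).reverse)
            k PySem.Dict.empty with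
    | .inl r => r
    | .inr (d', k') => solveLoop fuel d' k'

def solve (n : Int) (k : Int) : Int × Int :=
  solveLoop (k.toNat + 1) ((PySem.Dict.empty).insert n 1) k

-- ===== PORT B =====
def solve_alt (n : Int) (k : Int) : Int × Int :=
  let key : Int :=
    if k < 1 then n
    else
      let t : Nat := PySem.Int.bitLength k - 1
      let p : Int := (1 : Int) <<< t
      if k - (p - 1) ≤ PySem.Int.mod n p + 1 then PySem.Int.floordiv n p
      else PySem.Int.floordiv n p - 1
  (PySem.Int.floordiv key 2,
   PySem.Int.floordiv key 2 - (if PySem.Int.mod key 2 = 0 then 1 else 0))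

-- ===== PRECONDITION & SPEC =====
def Spec_solve (n : Int) (k : Int) (out : Int × Int) : Prop := out = solve_alt n k
instance (n : Int) (k : Int) (out : Int × Int) : Decidable (Spec_solve n k out) := by unfold Spec_solve; infer_instance

-- ===== CLAIM (what is proved, stated in full; the proofs are below) =====
def Claim_equal_solve : Prop := ∀ (n : Int) (k : Int), Dom_solve n k → Spec_solve n k (solve n k)

-- ===== LEMMAS AND PROOFS =====

-- the tuple A returns for a segment of size `key`
def retPair (key : Int) : Int × Int :=
  (PySem.Int.floordiv key 2,
   PySem.Int.floordiv key 2 - (if PySem.Int.mod key 2 = 0 then 1 else 0))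

-- canonical items list (already in descending key order) of A's dict after t completed levels
def citems (n : Int) (t : Nat) : List (Int × Int) :=
  if n % 2 ^ t + 1 = 2 ^ t then [(n / 2 ^ t, 2 ^ t)]
  else [(n / 2 ^ t, n % 2 ^ t + 1), (n / 2 ^ t - 1, 2 ^ t - (n % 2 ^ t + 1))]

lemma ediv_ediv_two (n p : Int) (hp : 0 < p) : n / p / 2 = n / (2 * p) := by
  rw [Int.ediv_ediv_of_nonneg hp.le, mul_comm]

lemma emod_two_mul (n p : Int) (hp : 0 < p) :
    n % (2 * p) = p * ((n / p) % 2) + n % p := by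
  have e1 := Int.ediv_add_emod n p
  have e2 := Int.ediv_add_emod n (2 * p)
  have e3 := Int.ediv_add_emod (n / p) 2
  rw [ediv_ediv_two n p hp] at e3
  linear_combination e2 - e1 - p * e3

lemma bitLen_eq (k : Int) (t : Nat) (h1 : 2 ^ t ≤ k) (h2 : k < 2 ^ (t + 1)) :
    PySem.Int.bitLength k = t + 1 := by
  have hk0 : (0 : Int) < k := lt_of_lt_of_le (by positivity) h1
  have hpow1 : ((2 ^ t : Nat) : Int) = (2 : Int) ^ t := by push_cast; ring
  have hpow2 : ((2 ^ (t + 1) : Nat) : Int) = (2 : Int) ^ (t + 1) := by push_cast; ring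
  have h1n : 2 ^ t ≤ k.natAbs := by omega
  have h2n : k.natAbs < 2 ^ (t + 1) := by omega
  have hA := PySem.Int.lt_two_pow_bitLength k
  have hB := PySem.Int.two_pow_bitLength_le k (by omega)
  have p1 : t < PySem.Int.bitLength k := by
    by_contra h
    push_neg at h
    have : (2 : Nat) ^ (PySem.Int.bitLength k) ≤ 2 ^ t := Nat.pow_le_pow_right (by norm_num) h
    omega
  have p2 : PySem.Int.bitLength k - 1 < t + 1 := by
    by_contra h
    push_neg at h
    have : (2 : Nat) ^ (t + 1) ≤ 2 ^ (PySem.Int.bitLength k - 1) := Nat.pow_le_pow_right (by norm_num) h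
    omega
  omega

-- shapes of the small dicts A builds inside one level
lemma modify_empty (x v : Int) :
    (PySem.Dict.empty : PySem.Dict Int Int).modify x 0 (· + v) = PySem.Dict.mk [(x, v)] := by
  simp [PySem.Dict.modify, PySem.Dict.insert, PySem.Dict.contains, PySem.Dict.getD,
        PySem.Dict.get?, PySem.Dict.empty]

lemma modify_one (x y v w : Int) (h : y ≠ x) :
    (PySem.Dict.mk [(x, v)]).modify y 0 (· + w) = PySem.Dict.mk [(x, v), (y, w)] := by
  simp [PySem.Dict.modify, PySem.Dict.insert, PySem.Dict.contains, PySem.Dict.getD,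
        PySem.Dict.get?, h, Ne.symm h]

lemma modify_one_self (x v w : Int) :
    (PySem.Dict.mk [(x, v)]).modify x 0 (· + w) = PySem.Dict.mk [(x, v + w)] := by
  simp [PySem.Dict.modify, PySem.Dict.insert, PySem.Dict.contains, PySem.Dict.getD,
        PySem.Dict.get?]

lemma modify_two_snd (x y v w u : Int) (h : y ≠ x) :
    (PySem.Dict.mk [(x, v), (y, w)]).modify y 0 (· + u) = PySem.Dict.mk [(x, v), (y, w + u)] := by
  simp [PySem.Dict.modify, PySem.Dict.insert, PySem.Dict.contains, PySem.Dict.getD,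
        PySem.Dict.get?, h, Ne.symm h]

lemma sorted_citems (n : Int) (t : Nat) :
    (PySem.List.sorted2 (citems n t) (fun p => p.1) (fun p => p.2)).reverse = citems n t := by
  unfold citems
  split_ifs with h
  · simp [PySem.List.sorted2, PySem.List.insertBy]
  · simp [PySem.List.sorted2, PySem.List.insertBy,
      show n / 2 ^ t - 1 < n / 2 ^ t by omega]

lemma inner_step (n : Int) (t : Nat) (k : Int) :
    solveInner (citems n t) k PySem.Dict.empty =
      if k ≤ n % 2 ^ t + 1 then Sum.inl (retPair (n / 2 ^ t))
      else if k ≤ 2 ^ t then Sum.inl (retPair (n / 2 ^ t - 1))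
      else Sum.inr (PySem.Dict.mk (citems n (t + 1)), k - 2 ^ t) := by
  have hfd : ∀ a : Int, PySem.Int.floordiv a 2 = a / 2 :=
    fun a => PySem.Int.floordiv_eq_ediv_of_pos (by norm_num)
  have hmd : ∀ a : Int, PySem.Int.mod a 2 = a % 2 :=
    fun a => PySem.Int.mod_eq_emod_of_pos (by norm_num)
  have hp : (0 : Int) < 2 ^ t := by positivity
  have hm0 := Int.emod_nonneg n (ne_of_gt hp)
  have hmlt := Int.emod_lt_of_pos n hp
  have hdd : n / 2 ^ t / 2 = n / (2 ^ t * 2) := by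
    rw [ediv_ediv_two n _ hp, mul_comm]
  have hmm : n % (2 ^ t * 2) = 2 ^ t * ((n / 2 ^ t) % 2) + n % 2 ^ t := by
    rw [mul_comm]; exact emod_two_mul n _ hp
  simp only [citems, retPair, pow_succ, hfd, hmd]
  rcases Int.emod_two_eq (n / 2 ^ t) with hpar | hpar <;> rw [hpar] at hmm
  · -- n / 2^t even
    generalize hgP : (2 : Int) ^ t = P at *
    generalize hgA : n / P = A at *
    generalize hgR : n % P = R at *
    generalize hgQ : n / (P * 2) = Q at *
    generalize hgS : n % (P * 2) = S at *
    by_cases hc : R + 1 = P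
    · rw [if_pos hc]
      simp only [solveInner, hfd, hmd]
      by_cases h1 : k ≤ R + 1
      · rw [if_pos (show k ≤ P by omega), if_pos h1]
      · rw [if_neg (show ¬ k ≤ P by omega), if_neg h1,
          if_neg (show ¬ k ≤ P by omega), if_pos hpar]
        rw [modify_empty, modify_one _ _ _ _ (by omega)]
        rw [if_neg (show ¬ S + 1 = P * 2 by omega)]
        simp only [Sum.inr.injEq, PySem.Dict.mk.injEq, List.cons.injEq, Prod.mk.injEq, and_true]
        omega
    · rw [if_neg hc]
      simp only [solveInner, hfd, hmd]
      by_cases h1 : k ≤ R + 1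
      · rw [if_pos h1, if_pos h1]
      · rw [if_neg h1, if_pos hpar]
        by_cases h2 : k ≤ P
        · rw [if_pos (show k - (R + 1) ≤ P - (R + 1) by omega), if_neg h1, if_pos h2]
        · rw [if_neg (show ¬ k - (R + 1) ≤ P - (R + 1) by omega), if_neg h1, if_neg h2,
            if_neg (show ¬ (A - 1) % 2 = 0 by omega)]
          rw [modify_empty, modify_one _ _ _ _ (by omega),
            show (A - 1) / 2 = A / 2 - 1 by omega,
            modify_two_snd _ _ _ _ _ (by omega)]
          rw [if_neg (show ¬ S + 1 = P * 2 by omega)]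
          simp only [Sum.inr.injEq, PySem.Dict.mk.injEq, List.cons.injEq, Prod.mk.injEq, and_true]
          omega
  · -- n / 2^t odd
    generalize hgP : (2 : Int) ^ t = P at *
    generalize hgA : n / P = A at *
    generalize hgR : n % P = R at *
    generalize hgQ : n / (P * 2) = Q at *
    generalize hgS : n % (P * 2) = S at *
    by_cases hc : R + 1 = P
    · rw [if_pos hc]
      simp only [solveInner, hfd, hmd]
      by_cases h1 : k ≤ R + 1
      · rw [if_pos (show k ≤ P by omega), if_pos h1]
      · rw [if_neg (show ¬ k ≤ P by omega), if_neg h1,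
          if_neg (show ¬ k ≤ P by omega),
          if_neg (show ¬ A % 2 = 0 by omega)]
        rw [modify_empty]
        rw [if_pos (show S + 1 = P * 2 by omega)]
        simp only [Sum.inr.injEq, PySem.Dict.mk.injEq, List.cons.injEq, Prod.mk.injEq, and_true]
        omega
    · rw [if_neg hc]
      simp only [solveInner, hfd, hmd]
      by_cases h1 : k ≤ R + 1
      · rw [if_pos h1, if_pos h1]
      · rw [if_neg h1, if_neg (show ¬ A % 2 = 0 by omega)]
        by_cases h2 : k ≤ P
        · rw [if_pos (show k - (R + 1) ≤ P - (R + 1) by omega), if_neg h1, if_pos h2]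
        · rw [if_neg (show ¬ k - (R + 1) ≤ P - (R + 1) by omega), if_neg h1, if_neg h2,
            if_pos (show (A - 1) % 2 = 0 by omega)]
          rw [modify_empty, show (A - 1) / 2 = A / 2 by omega, modify_one_self,
            modify_one _ _ _ _ (by omega)]
          rw [if_neg (show ¬ S + 1 = P * 2 by omega)]
          simp only [Sum.inr.injEq, PySem.Dict.mk.injEq, List.cons.injEq, Prod.mk.injEq, and_true]
          omega

lemma alt_eq_ret (n k₀ : Int) (t : Nat) (hk : 1 ≤ k₀)
    (h1 : 2 ^ t ≤ k₀) (h2 : k₀ < 2 ^ (t + 1)) :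
    solve_alt n k₀ =
      retPair (if k₀ - (2 ^ t - 1) ≤ n % 2 ^ t + 1 then n / 2 ^ t else n / 2 ^ t - 1) := by
  have hp : (0 : Int) < 2 ^ t := by positivity
  unfold solve_alt retPair
  rw [if_neg (show ¬ k₀ < 1 by omega)]
  rw [bitLen_eq k₀ t h1 h2]
  simp only [Nat.add_sub_cancel]
  rw [show (1 : Int) <<< t = 2 ^ t by simp [Int.shiftLeft_eq],
    PySem.Int.floordiv_eq_ediv_of_pos hp, PySem.Int.mod_eq_emod_of_pos hp]

lemma loop_eq (n k₀ : Int) (hk : 1 ≤ k₀) :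
    ∀ (fuel t : Nat) (d : PySem.Dict Int Int), d.items = citems n t →
      (2 : Int) ^ t ≤ k₀ → k₀.toNat + 1 = t + fuel →
      solveLoop fuel d (k₀ - (2 ^ t - 1)) = solve_alt n k₀ := by
  intro fuel
  induction fuel with
  | zero =>
    intro t d hd hle hfuel
    exfalso
    have ht : t < 2 ^ t := Nat.lt_two_pow_self
    have hcast : ((2 ^ t : Nat) : Int) ≤ k₀ := by push_cast; exact hle
    omega
  | succ fuel ih =>
    intro t d hd hle hfuel
    have hp : (0 : Int) < 2 ^ t := by positivity
    have hmlt := Int.emod_lt_of_pos n hp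
    have hm0 := Int.emod_nonneg n (ne_of_gt hp)
    have hs : (2 : Int) ^ (t + 1) = 2 * 2 ^ t := by ring
    simp only [solveLoop]
    rw [hd, sorted_citems, inner_step]
    by_cases h1 : k₀ - (2 ^ t - 1) ≤ n % 2 ^ t + 1
    · rw [if_pos h1, alt_eq_ret n k₀ t hk hle (by omega), if_pos h1]
    · by_cases h2 : k₀ - (2 ^ t - 1) ≤ 2 ^ t
      · rw [if_neg h1, if_pos h2, alt_eq_ret n k₀ t hk hle (by omega), if_neg h1]
      · rw [if_neg h1, if_neg h2]
        have harg : k₀ - (2 ^ t - 1) - 2 ^ t = k₀ - (2 ^ (t + 1) - 1) := by omega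
        show solveLoop fuel (PySem.Dict.mk (citems n (t + 1))) (k₀ - (2 ^ t - 1) - 2 ^ t) =
          solve_alt n k₀
        rw [harg]
        exact ih (t + 1) _ rfl (by omega) (by omega)

-- ===== VERDICT (by name: the statement is the Claim_ definition above) =====
theorem solve_spec : Claim_equal_solve := by
  unfold Claim_equal_solve
  intro n k _
  unfold Spec_solve solve
  have hinit : ((PySem.Dict.empty : PySem.Dict Int Int).insert n 1).items = citems n 0 := by
    simp [PySem.Dict.insert, PySem.Dict.contains, PySem.Dict.get?, PySem.Dict.empty, citems]
  by_cases hk : 1 ≤ k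
  · have := loop_eq n k hk (k.toNat + 1) 0 _ hinit (by simpa using hk) (by omega)
    simpa using this
  · have hkt : k.toNat = 0 := by omega
    rw [hkt]
    simp only [solveLoop]
    rw [hinit, sorted_citems, inner_step]
    rw [if_pos (show k ≤ n % 2 ^ 0 + 1 by
      have : n % (2 : Int) ^ 0 = 0 := by norm_num
      omega)]
    unfold solve_alt
    rw [if_pos (show k < 1 by omega)]
    simp [retPair]
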